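-- pv_equiv track=rewrite | github.com/Lienep0/Advent-Of-Code | 2025/Day-10/part1.py | min_xor_path
-- ===== SOURCE A (Python) =====
-- from collections import deque
--
-- def min_xor_path(values, target):
--     queue = deque([(0, 0)])  # (value, depth)
--     seen = {0: 0}
--
--     while queue:
--         x, d = queue.popleft()
--
--         if x == target:
--             return d
--
--         for v in values:
--             new = x ^ v
--             if new not in seen or seen[new] > d + 1:
--                 seen[new] = d + 1
--                 queue.append((new, d + 1))
--
--     return None
-- ===== SOURCE B (Python) =====
-- def min_xor_path(values, target):
--     # 0/1 subset-XOR dynamic program: best maps each XOR value reachable by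
--     # picking a subset of the values seen so far to the minimum subset size.
--     # Correct because XORing a value twice cancels, so a minimal BFS path
--     # never needs any value more than once.
--     best = {0: 0}
--     for v in values:
--         get = best.get
--         for x, c in list(best.items()):
--             n = x ^ v
--             m = get(n)
--             if m is None or m > c + 1:
--                 best[n] = c + 1
--     return best.get(target)
-- ===== Notes on version B (the rewrite author's own statement) =====
-- stated objective: alternative
-- what changed: Replaces A's BFS over XOR states (FIFO queue of (value, depth) pairs plus a distance dict) with a 0/1 subset-XOR dynamic program: a dict mapping each reachable XOR value to its minimum subset size, relaxed once per input value over a snapshot; correct because XORing a value twice cancels, so a minimal path uses each value at most once.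
import Mathlib
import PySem

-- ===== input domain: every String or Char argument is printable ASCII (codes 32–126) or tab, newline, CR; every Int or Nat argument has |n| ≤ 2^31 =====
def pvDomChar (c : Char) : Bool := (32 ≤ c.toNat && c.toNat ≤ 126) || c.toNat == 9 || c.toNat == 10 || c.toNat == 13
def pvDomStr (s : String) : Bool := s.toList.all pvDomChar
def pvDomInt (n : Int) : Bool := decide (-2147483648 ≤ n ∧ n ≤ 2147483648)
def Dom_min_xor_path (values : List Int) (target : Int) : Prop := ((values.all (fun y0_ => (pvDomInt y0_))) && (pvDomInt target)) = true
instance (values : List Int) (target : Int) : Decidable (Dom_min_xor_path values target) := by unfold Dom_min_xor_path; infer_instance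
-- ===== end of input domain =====

-- B replaces A's BFS (FIFO queue of (value, depth) pairs + distance dict) by a
-- 0/1 subset-XOR dynamic program over a dict of minimal subset sizes; same
-- return value (alternative algorithm, no speed claim).


-- ===== PORT A =====
-- A's `for v in values` body: pop state is (queue, seen); the branch
-- `if new not in seen or seen[new] > d + 1` is the match + inner if.
def pyAStep (d : Int) (x : Int) (st : List (Int × Int) × PySem.Dict Int Int) (v : Int) :
    List (Int × Int) × PySem.Dict Int Int :=
  let new := PySem.Int.bxor x v
  match st.2.get? new with
  | none => (st.1 ++ [(new, d + 1)], st.2.insert new (d + 1))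
  | some s => if d + 1 < s then (st.1 ++ [(new, d + 1)], st.2.insert new (d + 1)) else st

-- A's `while queue:` loop; the Nat fuel is only a totality guard (proved
-- sufficient in the lemmas below), the algorithm never consults it.
def loopA (values : List Int) (target : Int) :
    Nat → List (Int × Int) → PySem.Dict Int Int → Option Int
  | 0, _, _ => none
  | _ + 1, [], _ => none
  | fuel + 1, (x, d) :: q, seen =>
    if x = target then some d
    else
      let st := values.foldl (pyAStep d x) (q, seen)
      loopA values target fuel st.1 st.2

def min_xor_path (values : List Int) (target : Int) : Option Int :=
  loopA values target (2 ^ values.length + 1) [(0, 0)] (PySem.Dict.ofList [(0, 0)])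

-- ===== PORT B =====
-- B's inner loop body: relax n = x ^ v from snapshot entry (x, c).
def pyBRelax (v : Int) (b : PySem.Dict Int Int) (xc : Int × Int) : PySem.Dict Int Int :=
  let n := PySem.Int.bxor xc.1 v
  match b.get? n with
  | none => b.insert n (xc.2 + 1)
  | some s => if xc.2 + 1 < s then b.insert n (xc.2 + 1) else b

-- B: for v in values: for (x, c) in list(best.items()): relax; return best.get(target)
def min_xor_path_alt (values : List Int) (target : Int) : Option Int :=
  let best := values.foldl (fun best v => best.items.foldl (pyBRelax v) best)
    (PySem.Dict.ofList [(0, 0)])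
  best.get? target

-- ===== PRECONDITION & SPEC =====
def Spec_min_xor_path (values : List Int) (target : Int) (out : Option Int) : Prop := out = min_xor_path_alt values target
instance (values : List Int) (target : Int) (out : Option Int) : Decidable (Spec_min_xor_path values target out) := by unfold Spec_min_xor_path; infer_instance

-- ===== CLAIM (what is proved, stated in full; the proofs are below) =====
def Claim_equal_min_xor_path : Prop := ∀ (values : List Int) (target : Int), Dom_min_xor_path values target → Spec_min_xor_path values target (min_xor_path values target)

-- ===== LEMMAS AND PROOFS =====

-- xor as a sign/magnitude pair: bxor is componentwise xor in this encoding.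
def xpart (a : Int) : Nat := if 0 ≤ a then a.toNat else (-a - 1).toNat
def xsign (a : Int) : Bool := decide (a < 0)
def xdec (s : Bool) (n : Nat) : Int := if s then -(n : Int) - 1 else (n : Int)

theorem bxor_eq_dec (a b : Int) :
    PySem.Int.bxor a b = xdec (xor (xsign a) (xsign b)) (xpart a ^^^ xpart b) := by
  unfold PySem.Int.bxor xdec xsign xpart
  by_cases ha : 0 ≤ a <;> by_cases hb : 0 ≤ b <;>
    simp [ha, hb, not_le.mp, show (a < 0) = ¬ (0 ≤ a) from by simp [not_le],
      show (b < 0) = ¬ (0 ≤ b) from by simp [not_le]]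

theorem bxor_assoc (a b c : Int) :
    PySem.Int.bxor (PySem.Int.bxor a b) c = PySem.Int.bxor a (PySem.Int.bxor b c) := by
  have h1 : ∀ s n, xsign (xdec s n) = s := by intro s n; cases s <;> simp [xsign, xdec] <;> omega
  have h2 : ∀ s n, xpart (xdec s n) = n := by intro s n; cases s <;> simp [xpart, xdec] <;> omega
  rw [bxor_eq_dec a b, bxor_eq_dec b c, bxor_eq_dec _ c, bxor_eq_dec a _,
    h1, h2, h1, h2, Bool.xor_assoc, Nat.xor_assoc]

theorem bxor_right_comm (a v w : Int) :
    PySem.Int.bxor (PySem.Int.bxor a v) w = PySem.Int.bxor (PySem.Int.bxor a w) v := by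
  rw [bxor_assoc, bxor_assoc, PySem.Int.bxor_comm v w]

theorem bxor_cancel_right (a v : Int) : PySem.Int.bxor (PySem.Int.bxor a v) v = a := by
  rw [bxor_assoc, PySem.Int.bxor_self, PySem.Int.bxor_zero]

-- Finite overapproximation of every value either search can ever see.
def xorReach (values : List Int) : Finset Int :=
  values.foldr (fun v s => s ∪ s.image (fun x => PySem.Int.bxor x v)) {0}

theorem zero_mem_xorReach (values : List Int) : (0 : Int) ∈ xorReach values := by
  induction values with
  | nil => simp [xorReach]
  | cons v vs ih => simp [xorReach] at ih ⊢; exact Or.inl ih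

theorem xorReach_closed (values : List Int) :
    ∀ x ∈ xorReach values, ∀ v ∈ values, PySem.Int.bxor x v ∈ xorReach values := by
  induction values with
  | nil => intro x hx v hv; simp at hv
  | cons w ws ih =>
    intro x hx v hv
    simp only [xorReach, List.foldr_cons, Finset.mem_union, Finset.mem_image] at hx ⊢
    rcases List.mem_cons.mp hv with rfl | hv
    · rcases hx with hx | ⟨y, hy, rfl⟩
      · exact Or.inr ⟨x, hx, rfl⟩
      · left; rw [bxor_cancel_right]; exact hy
    · rcases hx with hx | ⟨y, hy, rfl⟩
      · exact Or.inl (ih x hx v hv)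
      · exact Or.inr ⟨PySem.Int.bxor y v, ih y hy v hv, bxor_right_comm y v w⟩

theorem card_xorReach (values : List Int) : (xorReach values).card ≤ 2 ^ values.length := by
  induction values with
  | nil => simp [xorReach]
  | cons v vs ih =>
    calc (xorReach (v :: vs)).card
        ≤ (xorReach vs).card + ((xorReach vs).image (fun x => PySem.Int.bxor x v)).card :=
          Finset.card_union_le _ _
      _ ≤ (xorReach vs).card + (xorReach vs).card := by
          exact Nat.add_le_add_left (Finset.card_image_le) _
      _ ≤ 2 ^ vs.length + 2 ^ vs.length := by omega
      _ = 2 ^ (v :: vs).length := by simp [List.length_cons]; ring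

theorem nodup_subset_card {S : List Int} {R : Finset Int}
    (hnd : S.Nodup) (hsub : ∀ y ∈ S, y ∈ R) : S.length ≤ R.card := by
  classical
  have h1 : S.toFinset ⊆ R := fun y hy => hsub y (List.mem_toFinset.mp hy)
  have h2 := Finset.card_le_card h1
  rwa [List.toFinset_card_of_nodup hnd] at h2

-- Proof-layer level-synchronous BFS, the bridge between A's queue and B's DP.
def pyBStep (x : Int) (st : PySem.Set Int × List Int) (v : Int) :
    PySem.Set Int × List Int :=
  let n := PySem.Int.bxor x v
  if PySem.Set.contains st.1 n then st else (PySem.Set.add st.1 n, st.2 ++ [n])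

def pyBExpand (values : List Int) (st : PySem.Set Int × List Int) (x : Int) :
    PySem.Set Int × List Int :=
  values.foldl (pyBStep x) st

def loopB (values : List Int) (target : Int) :
    Nat → PySem.Set Int → List Int → Int → Option Int
  | 0, _, _, _ => none
  | fuel + 1, seen, frontier, d =>
    if frontier.isEmpty then none
    else
      let st := frontier.foldl (pyBExpand values) (seen, [])
      if st.2.contains target then some (d + 1)
      else loopB values target fuel st.1 st.2 (d + 1)

theorem pyBExpand_eq (values : List Int) (st : PySem.Set Int × List Int) (x : Int) :
    pyBExpand values st x = values.foldl (pyBStep x) st := rfl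

theorem perx (vsAll : List Int) : ∀ (vs : List Int) (q : List (Int × Int))
    (seen : PySem.Dict Int Int) (S : PySem.Set Int) (L : List Int) (x d : Int),
    seen.keys = S → (∀ p ∈ seen.items, p.2 ≤ d + 1) → S.Nodup →
    ∃ Δ : List Int,
      (vs.foldl (pyAStep d x) (q, seen)).1 = q ++ Δ.map (fun n => (n, d + 1)) ∧
      (vs.foldl (pyAStep d x) (q, seen)).2.keys = S ++ Δ ∧
      (∀ p ∈ (vs.foldl (pyAStep d x) (q, seen)).2.items, p.2 ≤ d + 1) ∧
      (vs.foldl (pyBStep x) (S, L)) = (S ++ Δ, L ++ Δ) ∧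
      (S ++ Δ).Nodup ∧
      (∀ n ∈ Δ, ∃ v ∈ vs, n = PySem.Int.bxor x v) := by
  intro vs
  induction vs with
  | nil =>
    intro q seen S L x d hkeys hval hnd
    exact ⟨[], by simp, by simpa using hkeys, hval, by simp, by simpa using hnd, by simp⟩
  | cons v vs ih =>
    intro q seen S L x d hkeys hval hnd
    by_cases hn : PySem.Int.bxor x v ∈ S
    · -- already seen: both states unchanged
      obtain ⟨s, hs⟩ : ∃ s, seen.get? (PySem.Int.bxor x v) = some s := by
        have : seen.get? (PySem.Int.bxor x v) ≠ none := by
          rw [Ne, PySem.Dict.get?_eq_none_iff_not_mem_keys, hkeys]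
          simpa using hn
        cases h : seen.get? (PySem.Int.bxor x v) with
        | none => exact absurd h this
        | some s => exact ⟨s, rfl⟩
      have hmem := PySem.Dict.mem_items_of_get?_eq_some seen hs
      have hsle : s ≤ d + 1 := hval _ hmem
      have hA : pyAStep d x (q, seen) v = (q, seen) := by
        simp only [pyAStep, hs]
        rw [if_neg (by omega)]
      have hc : PySem.Set.contains S (PySem.Int.bxor x v) = true := by
        rw [PySem.Set.contains_iff]; exact hn
      have hB : pyBStep x (S, L) v = (S, L) := by
        simp [pyBStep, hc]
        exact hn
      rw [List.foldl_cons, List.foldl_cons, hA, hB]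
      obtain ⟨Δ, h1, h2, h3, h4, h5, h6⟩ := ih q seen S L x d hkeys hval hnd
      exact ⟨Δ, h1, h2, h3, h4, h5, fun n hnΔ => by
        obtain ⟨w, hw, hweq⟩ := h6 n hnΔ; exact ⟨w, List.mem_cons_of_mem _ hw, hweq⟩⟩
    · -- fresh key: both append it
      have hg : seen.get? (PySem.Int.bxor x v) = none := by
        rw [PySem.Dict.get?_eq_none_iff_not_mem_keys, hkeys]; simpa using hn
      have hA : pyAStep d x (q, seen) v
          = (q ++ [(PySem.Int.bxor x v, d + 1)], seen.insert (PySem.Int.bxor x v) (d + 1)) := by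
        simp only [pyAStep, hg]
      have hc : PySem.Set.contains S (PySem.Int.bxor x v) = false := by
        rw [Bool.eq_false_iff, Ne, PySem.Set.contains_iff]; exact hn
      have hB : pyBStep x (S, L) v
          = (S ++ [PySem.Int.bxor x v], L ++ [PySem.Int.bxor x v]) := by
        simp [pyBStep, hc, PySem.Set.add_of_not_mem hn]
        exact hn
      rw [List.foldl_cons, List.foldl_cons, hA, hB]
      have hkeys' : (seen.insert (PySem.Int.bxor x v) (d + 1)).keys = S ++ [PySem.Int.bxor x v] := by
        have hcA : seen.contains (PySem.Int.bxor x v) = false := by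
          rw [Bool.eq_false_iff, Ne, PySem.Dict.contains_iff_mem_keys, hkeys]; exact hn
        rw [PySem.Dict.keys_insert_of_not_contains seen _ hcA, hkeys]
      have hval' : ∀ p ∈ (seen.insert (PySem.Int.bxor x v) (d + 1)).items, p.2 ≤ d + 1 := by
        intro p hp
        rcases (PySem.Dict.mem_items_insert seen _ _ p).mp hp with rfl | ⟨hp', _⟩
        · simp
        · exact hval p hp'
      have hnd' : (S ++ [PySem.Int.bxor x v]).Nodup := by
        simp [List.nodup_append, hnd, hn]
        exact fun a ha h => hn (h ▸ ha)
      obtain ⟨Δ, h1, h2, h3, h4, h5, h6⟩ := ih (q ++ [(PySem.Int.bxor x v, d + 1)])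
        (seen.insert (PySem.Int.bxor x v) (d + 1)) (S ++ [PySem.Int.bxor x v])
        (L ++ [PySem.Int.bxor x v]) x d hkeys' hval' hnd'
      refine ⟨PySem.Int.bxor x v :: Δ, ?_, ?_, h3, ?_, ?_, ?_⟩
      · rw [h1]; simp
      · rw [h2]; simp
      · rw [h4]; simp
      · simpa [List.append_assoc] using h5
      · intro n hnΔ
        rcases List.mem_cons.mp hnΔ with rfl | hnΔ
        · exact ⟨v, List.mem_cons_self, rfl⟩
        · obtain ⟨w, hw, hweq⟩ := h6 n hnΔ; exact ⟨w, List.mem_cons_of_mem _ hw, hweq⟩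

theorem fold_prefix (vs : List Int) : ∀ (q : List (Int × Int)) (seen : PySem.Dict Int Int)
    (d x : Int), ∃ ext seen', vs.foldl (pyAStep d x) (q, seen) = (q ++ ext, seen') := by
  induction vs with
  | nil => intro q seen d x; exact ⟨[], seen, by simp⟩
  | cons v vs ih =>
    intro q seen d x
    have hstep : ∃ e seen1, pyAStep d x (q, seen) v = (q ++ e, seen1) := by
      unfold pyAStep
      cases h : seen.get? (PySem.Int.bxor x v) with
      | none => exact ⟨[(PySem.Int.bxor x v, d + 1)], seen.insert (PySem.Int.bxor x v) (d + 1), by simp [h]⟩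
      | some s =>
        by_cases hlt : d + 1 < s
        · exact ⟨[(PySem.Int.bxor x v, d + 1)], seen.insert (PySem.Int.bxor x v) (d + 1), by simp [h, hlt]⟩
        · exact ⟨[], seen, by simp [h, hlt]⟩
    obtain ⟨e, seen1, he⟩ := hstep
    obtain ⟨ext, seen', hrec⟩ := ih (q ++ e) seen1 d x
    exact ⟨e ++ ext, seen', by rw [List.foldl_cons, he, hrec, List.append_assoc]⟩

theorem popretA (values : List Int) (target : Int) : ∀ (l : List Int) (f : Nat)
    (q : List (Int × Int)) (seen : PySem.Dict Int Int) (e : Int),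
    target ∈ l → l.length ≤ f →
    loopA values target f (l.map (fun n => (n, e)) ++ q) seen = some e := by
  intro l
  induction l with
  | nil => intro f q seen e h; exact absurd h (List.not_mem_nil)
  | cons y ys ih =>
    intro f q seen e hmem hf
    obtain ⟨f', rfl⟩ : ∃ f', f = f' + 1 := ⟨f - 1, by simp at hf; omega⟩
    simp only [List.map_cons, List.cons_append, loopA]
    by_cases hy : y = target
    · rw [if_pos hy]
    · rw [if_neg hy]
      rcases List.mem_cons.mp hmem with rfl | hmem'
      · exact absurd rfl hy
      · obtain ⟨ext, seen', hfold⟩ := fold_prefix values (ys.map (fun n => (n, e)) ++ q) seen e y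
        simp only [hfold]
        rw [List.append_assoc]
        exact ih f' (q ++ ext) seen' e hmem' (by simp at hf ⊢; omega)

-- Processing one whole layer: A consumes |cur| pops and reaches the queue that
-- is exactly the next layer (at depth c+1), with coupled seen structures.
theorem inner (values : List Int) (target : Int) : ∀ (cur : List Int) (fA : Nat)
    (L : List Int) (seen : PySem.Dict Int Int) (S : PySem.Set Int) (c : Int),
    seen.keys = S → (∀ p ∈ seen.items, p.2 ≤ c + 1) → S.Nodup →
    (∀ y ∈ S, y ∈ xorReach values) → (∀ y ∈ cur, y ∈ xorReach values) →
    (∀ y ∈ cur, y ≠ target) →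
    ∃ (Δ : List Int) (seen' : PySem.Dict Int Int),
      loopA values target (fA + cur.length)
          (cur.map (fun n => (n, c)) ++ L.map (fun n => (n, c + 1))) seen
        = loopA values target fA ((L ++ Δ).map (fun n => (n, c + 1))) seen' ∧
      cur.foldl (pyBExpand values) (S, L) = (S ++ Δ, L ++ Δ) ∧
      seen'.keys = S ++ Δ ∧ (∀ p ∈ seen'.items, p.2 ≤ c + 1) ∧
      (S ++ Δ).Nodup ∧ (∀ y ∈ Δ, y ∈ xorReach values) := by
  intro cur
  induction cur with
  | nil =>
    intro fA L seen S c hkeys hval hnd _ _ _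
    exact ⟨[], seen, by simp, by simp, by simpa using hkeys, hval, by simpa using hnd, by simp⟩
  | cons x cur ih =>
    intro fA L seen S c hkeys hval hnd hSR hcurR hcurT
    have hx : x ≠ target := hcurT x List.mem_cons_self
    have hxR : x ∈ xorReach values := hcurR x List.mem_cons_self
    obtain ⟨Δx, hq, hk, hv2, hbf, hnd2, hΔx⟩ := perx values values
      (cur.map (fun n => (n, c)) ++ L.map (fun n => (n, c + 1))) seen S L x c hkeys hval hnd
    have hΔxR : ∀ y ∈ Δx, y ∈ xorReach values := by
      intro y hy
      obtain ⟨v, hv, rfl⟩ := hΔx y hy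
      exact xorReach_closed values x hxR v hv
    have hSR2 : ∀ y ∈ S ++ Δx, y ∈ xorReach values := by
      intro y hy
      rcases List.mem_append.mp hy with hy | hy
      · exact hSR y hy
      · exact hΔxR y hy
    obtain ⟨Δ', seen'', ihA, ihB, ihK, ihV, ihN, ihR⟩ := ih fA (L ++ Δx)
      (values.foldl (pyAStep c x) (cur.map (fun n => (n, c)) ++ L.map (fun n => (n, c + 1)), seen)).2
      (S ++ Δx) c hk hv2 hnd2 hSR2
      (fun y hy => hcurR y (List.mem_cons_of_mem _ hy))
      (fun y hy => hcurT y (List.mem_cons_of_mem _ hy))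
    have hstep : loopA values target (fA + (x :: cur).length)
        ((x :: cur).map (fun n => (n, c)) ++ L.map (fun n => (n, c + 1))) seen
        = loopA values target (fA + cur.length)
            (cur.map (fun n => (n, c)) ++ (L ++ Δx).map (fun n => (n, c + 1)))
            (values.foldl (pyAStep c x)
              (cur.map (fun n => (n, c)) ++ L.map (fun n => (n, c + 1)), seen)).2 := by
      simp only [List.length_cons, List.map_cons, List.cons_append, ← Nat.add_assoc]
      rw [loopA]
      rw [if_neg hx]
      show loopA values target (fA + cur.length)
          (values.foldl (pyAStep c x)
            (cur.map (fun n => (n, c)) ++ L.map (fun n => (n, c + 1)), seen)).1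
          (values.foldl (pyAStep c x)
            (cur.map (fun n => (n, c)) ++ L.map (fun n => (n, c + 1)), seen)).2 = _
      rw [hq]
      simp [List.append_assoc]
    refine ⟨Δx ++ Δ', seen'', ?_, ?_, ?_, ihV, ?_, ?_⟩
    · rw [hstep, ihA, List.append_assoc]
    · rw [List.foldl_cons, pyBExpand_eq, hbf, ihB]
      simp [List.append_assoc]
    · rw [ihK, List.append_assoc]
    · simpa [List.append_assoc] using ihN
    · intro y hy
      rcases List.mem_append.mp hy with hy | hy
      · exact hΔxR y hy
      · exact ihR y hy

-- The level-synchronous simulation: at every layer boundary the two loops agree.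
theorem sim (values : List Int) (target : Int) : ∀ (fB : Nat) (frontier : List Int)
    (seen : PySem.Dict Int Int) (S : PySem.Set Int) (c : Int) (fA : Nat),
    seen.keys = S → (∀ p ∈ seen.items, p.2 ≤ c) → S.Nodup →
    (∀ y ∈ S, y ∈ xorReach values) → (∀ y ∈ frontier, y ∈ S) → target ∉ frontier →
    (xorReach values).card + frontier.length + 1 ≤ fA + S.length →
    (xorReach values).card + 2 ≤ fB + S.length →
    loopA values target fA (frontier.map (fun n => (n, c))) seen
      = loopB values target fB S frontier c := by
  intro fB
  induction fB with
  | zero =>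
    intro frontier seen S c fA hkeys hval hnd hSR hfS htar hfA hfB
    have hcard : S.length ≤ (xorReach values).card := nodup_subset_card hnd hSR
    omega
  | succ fB ih =>
    intro frontier seen S c fA hkeys hval hnd hSR hfS htar hfA hfB
    have hcard : S.length ≤ (xorReach values).card := nodup_subset_card hnd hSR
    rcases frontier with _ | ⟨y, ys⟩
    · obtain ⟨fA', rfl⟩ : ∃ k, fA = k + 1 := ⟨fA - 1, by simp at hfA; omega⟩
      simp only [List.map_nil]
      rw [loopA, loopB]
      simp
    · have hlen1 : ys.length + 1 ≤ fA := by simp at hfA; omega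
      obtain ⟨fA', hfA'⟩ : ∃ k, fA = k + (y :: ys).length :=
        ⟨fA - (y :: ys).length, by simp at hlen1 ⊢; omega⟩
      subst hfA'
      obtain ⟨Δ, seen', hAeq, hBfold, hK, hV, hN, hR⟩ := inner values target (y :: ys) fA' []
        seen S c hkeys (fun p hp => le_trans (hval p hp) (by omega)) hnd hSR
        (fun z hz => hSR z (hfS z hz))
        (fun z hz h => htar (h ▸ hz))
      simp only [List.map_nil, List.append_nil, List.nil_append] at hAeq hBfold
      have hΔcard : S.length + Δ.length ≤ (xorReach values).card := by
        have h1 : (S ++ Δ).length ≤ (xorReach values).card := by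
          apply nodup_subset_card hN
          intro z hz
          rcases List.mem_append.mp hz with hz | hz
          · exact hSR z hz
          · exact hR z hz
        simpa using h1
      rw [hAeq, loopB]
      rw [if_neg (by simp)]
      show _ = (if ((y :: ys).foldl (pyBExpand values) (S, [])).2.contains target = true
          then some (c + 1)
          else loopB values target fB ((y :: ys).foldl (pyBExpand values) (S, [])).1
            ((y :: ys).foldl (pyBExpand values) (S, [])).2 (c + 1))
      rw [hBfold]
      by_cases hct : target ∈ Δ
      · rw [if_pos (by simpa using hct)]
        have hpop := popretA values target Δ fA' [] seen' (c + 1) hct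
          (by simp at hfA hΔcard ⊢; omega)
        simpa using hpop
      · rw [if_neg (by simpa using hct)]
        rcases Δ with _ | ⟨z, zs⟩
        · obtain ⟨fA'', rfl⟩ : ∃ k, fA' = k + 1 := ⟨fA' - 1, by simp at hfA; omega⟩
          obtain ⟨fB', rfl⟩ : ∃ k, fB = k + 1 := ⟨fB - 1, by omega⟩
          simp only [List.map_nil]
          rw [loopA, loopB]
          simp
        · exact ih (z :: zs) seen' (S ++ z :: zs) (c + 1) fA' hK hV hN
            (fun w hw => by
              rcases List.mem_append.mp hw with hw | hw
              · exact hSR w hw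
              · exact hR w hw)
            (fun w hw => List.mem_append.mpr (Or.inr hw)) hct
            (by simp at hfA hΔcard ⊢; omega)
            (by simp at hfB hΔcard ⊢; omega)

-- ========== The common mathematical value: minimum sublist-XOR count ==========

def xorL (l : List Int) : Int := l.foldr PySem.Int.bxor 0

-- minimal length of a sublist of p XORing to x (the value both programs compute)
def minS (p : List Int) (x : Int) : Option Nat :=
  ((p.sublists.filter (fun s => xorL s = x)).map List.length).min?

-- words over the alphabet `values`, length ≤ d (BFS paths)
def Wle (values : List Int) (d : Nat) (x : Int) : Prop :=
  ∃ w : List Int, (∀ v ∈ w, v ∈ values) ∧ w.length ≤ d ∧ xorL w = x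

theorem xorL_nil : xorL [] = 0 := rfl
theorem xorL_cons (a : Int) (l : List Int) : xorL (a :: l) = PySem.Int.bxor a (xorL l) := rfl

theorem xorL_append (s t : List Int) : xorL (s ++ t) = PySem.Int.bxor (xorL s) (xorL t) := by
  induction s with
  | nil =>
    show xorL t = PySem.Int.bxor (xorL []) (xorL t)
    rw [xorL_nil, PySem.Int.bxor_comm, PySem.Int.bxor_zero]
  | cons a s ih => simp only [List.cons_append, xorL_cons, ih, bxor_assoc]

theorem bxor_left_comm (a b c : Int) :
    PySem.Int.bxor a (PySem.Int.bxor b c) = PySem.Int.bxor b (PySem.Int.bxor a c) := by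
  rw [← bxor_assoc, PySem.Int.bxor_comm a b, bxor_assoc]

theorem bxor_cancel_left (a b : Int) : PySem.Int.bxor a (PySem.Int.bxor a b) = b := by
  rw [← bxor_assoc, PySem.Int.bxor_self, PySem.Int.bxor_comm, PySem.Int.bxor_zero]

theorem xorL_perm {s t : List Int} (h : s.Perm t) : xorL s = xorL t := by
  induction h with
  | nil => rfl
  | cons a _ ih => simp only [xorL_cons, ih]
  | swap a b l => simp only [xorL_cons, bxor_left_comm]
  | trans _ _ ih1 ih2 => exact ih1.trans ih2

theorem xorL_erase {v : Int} {s : List Int} (h : v ∈ s) :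
    xorL s = PySem.Int.bxor v (xorL (s.erase v)) := by
  induction s with
  | nil => exact absurd h (List.not_mem_nil)
  | cons a s ih =>
    rw [List.erase_cons]
    by_cases hav : a = v
    · subst hav; simp [xorL_cons]
    · rw [if_neg (by simpa using hav)]
      have hv : v ∈ s := by rcases List.mem_cons.mp h with h' | h' <;> [exact absurd h'.symm hav; exact h']
      rw [xorL_cons, xorL_cons, ih hv, bxor_left_comm]

-- cancellation: any word over the values reduces to a subperm of the values, no longer
theorem word_to_sub (p : List Int) : ∀ (w : List Int), (∀ v ∈ w, v ∈ p) →
    ∃ s, s.Subperm p ∧ s.length ≤ w.length ∧ xorL s = xorL w := by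
  intro w
  induction w with
  | nil => exact fun _ => ⟨[], List.nil_subperm, le_refl _, rfl⟩
  | cons v w ih =>
    intro hm
    obtain ⟨s, hsp, hlen, hx⟩ := ih (fun u hu => hm u (List.mem_cons_of_mem _ hu))
    by_cases hv : v ∈ s
    · refine ⟨s.erase v, (((List.erase_sublist : (s.erase v).Sublist s)).subperm).trans hsp, ?_, ?_⟩
      · have := List.length_erase_of_mem hv
        simp only [List.length_cons]; omega
      · rw [xorL_cons, hx.symm, xorL_erase hv, bxor_cancel_left]
    · refine ⟨v :: s, ?_, by simpa using Nat.succ_le_succ hlen, by rw [xorL_cons, xorL_cons, hx]⟩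
      rw [List.subperm_ext_iff]
      intro a ha
      rcases List.mem_cons.mp ha with rfl | ha'
      · have h1 : (a :: s).count a = s.count a + 1 := by simp [List.count_cons]
        have h2 : s.count a = 0 := List.count_eq_zero.mpr hv
        have h3 : 0 < p.count a := List.count_pos_iff.mpr (hm a List.mem_cons_self)
        omega
      · have h4 := (List.subperm_ext_iff.mp hsp) a ha'
        have h5 : (v :: s).count a ≤ s.count a + 1 := by simp [List.count_cons]; split <;> omega
        by_cases hva : v = a
        · subst hva; exact absurd ha' hv
        · have : (v :: s).count a = s.count a := by simp [List.count_cons, hva]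
          omega

theorem Wle_zero (values : List Int) (x : Int) : Wle values 0 x ↔ x = 0 := by
  constructor
  · rintro ⟨w, _, hl, hx⟩
    have : w = [] := List.length_eq_zero_iff.mp (Nat.le_zero.mp hl)
    subst this; exact hx.symm
  · rintro rfl; exact ⟨[], by simp, by simp, rfl⟩

theorem Wle_mono (values : List Int) {d d' : Nat} (h : d ≤ d') {x : Int} :
    Wle values d x → Wle values d' x := by
  rintro ⟨w, hm, hl, hx⟩
  exact ⟨w, hm, le_trans hl h, hx⟩

theorem Wle_succ (values : List Int) (d : Nat) (x : Int) :
    Wle values (d + 1) x ↔ Wle values d x ∨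
      ∃ y, Wle values d y ∧ ∃ v ∈ values, x = PySem.Int.bxor y v := by
  constructor
  · rintro ⟨w, hm, hl, hx⟩
    rcases w with _ | ⟨v, w'⟩
    · exact Or.inl ⟨[], by simp, by simp, hx⟩
    · by_cases hw : (v :: w').length ≤ d
      · exact Or.inl ⟨v :: w', hm, hw, hx⟩
      · refine Or.inr ⟨xorL w', ⟨w', fun u hu => hm u (List.mem_cons_of_mem _ hu),
          by simp at hl hw ⊢; omega, rfl⟩, v, hm v List.mem_cons_self, ?_⟩
        rw [← hx, xorL_cons, PySem.Int.bxor_comm]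
  · rintro (h | ⟨y, ⟨w, hm, hl, hx⟩, v, hv, rfl⟩)
    · exact Wle_mono values (Nat.le_succ d) h
    · refine ⟨v :: w, ?_, by simpa using Nat.succ_le_succ hl,
        by rw [xorL_cons, hx, PySem.Int.bxor_comm]⟩
      intro u hu
      rcases List.mem_cons.mp hu with rfl | hu
      · exact hv
      · exact hm u hu

theorem minS_none_iff (p : List Int) (x : Int) :
    minS p x = none ↔ ∀ s, s.Sublist p → xorL s ≠ x := by
  simp [minS, List.min?_eq_none_iff, List.map_eq_nil_iff, List.filter_eq_nil_iff,
    List.mem_sublists]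

theorem minS_some_iff (p : List Int) (x : Int) (k : Nat) :
    minS p x = some k ↔
      ((∃ s, s.Sublist p ∧ s.length = k ∧ xorL s = x) ∧
        ∀ s, s.Sublist p → xorL s = x → k ≤ s.length) := by
  unfold minS
  rw [List.min?_eq_some_iff']
  constructor
  · rintro ⟨hmem, hbound⟩
    simp only [List.mem_map, List.mem_filter, List.mem_sublists, decide_eq_true_eq] at hmem hbound
    obtain ⟨s, ⟨hs, hx⟩, hlen⟩ := hmem
    refine ⟨⟨s, hs, hlen, hx⟩, ?_⟩
    intro s' hs' hx'
    exact hbound s'.length ⟨s', ⟨hs', hx'⟩, rfl⟩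
  · rintro ⟨⟨s, hs, hlen, hx⟩, hbound⟩
    constructor
    · simp only [List.mem_map, List.mem_filter, List.mem_sublists, decide_eq_true_eq]
      exact ⟨s, ⟨hs, hx⟩, hlen⟩
    · intro b hb
      simp only [List.mem_map, List.mem_filter, List.mem_sublists, decide_eq_true_eq] at hb
      obtain ⟨s', ⟨hs', hx'⟩, rfl⟩ := hb
      exact hbound s' hs' hx'

theorem minS_zero (p : List Int) : minS p 0 = some 0 := by
  rw [minS_some_iff]
  exact ⟨⟨[], List.nil_sublist p, rfl, rfl⟩, fun s _ _ => Nat.zero_le _⟩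

-- Wle reachability and minS agree (the cancellation argument, both directions)
theorem Wle_of_sub {p s : List Int} (hs : s.Sublist p) : Wle p s.length (xorL s) :=
  ⟨s, fun v hv => hs.subset hv, le_refl _, rfl⟩

theorem minS_some_of_level (p : List Int) (x : Int) (d : Nat)
    (h1 : Wle p (d + 1) x) (h2 : ¬ Wle p d x) : minS p x = some (d + 1) := by
  obtain ⟨w, hm, hl, hx⟩ := h1
  obtain ⟨s, hsp, hslen, hsx⟩ := word_to_sub p w hm
  obtain ⟨s₀, hperm, hsub⟩ := hsp
  have hx0 : xorL s₀ = x := (xorL_perm hperm).trans (hsx.trans hx)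
  have hlen0 : s₀.length ≤ d + 1 := by rw [hperm.length_eq]; omega
  have hlow : ∀ t, t.Sublist p → xorL t = x → d + 1 ≤ t.length := by
    intro t ht hxt
    by_contra hlt
    push_neg at hlt
    exact h2 (Wle_mono p (by omega) (hxt ▸ Wle_of_sub ht))
  rw [minS_some_iff]
  exact ⟨⟨s₀, hsub, le_antisymm hlen0 (hlow s₀ hsub hx0), hx0⟩, hlow⟩

theorem minS_none_of_never (p : List Int) (x : Int) (h : ∀ k, ¬ Wle p k x) :
    minS p x = none := by
  rw [minS_none_iff]
  intro s hs hx
  exact h s.length (hx ▸ Wle_of_sub hs)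

-- ========== level BFS computes minS ==========

theorem expand1 (x : Int) : ∀ (vs : List Int) (S : PySem.Set Int) (L : List Int),
    S.Nodup →
    ∃ Δ, vs.foldl (pyBStep x) (S, L) = (S ++ Δ, L ++ Δ) ∧ (S ++ Δ).Nodup ∧
      (∀ z ∈ Δ, ∃ v ∈ vs, z = PySem.Int.bxor x v) ∧
      (∀ v ∈ vs, PySem.Int.bxor x v ∈ S ++ Δ) := by
  intro vs
  induction vs with
  | nil => intro S L hnd; exact ⟨[], by simp, by simpa using hnd, by simp, by simp⟩
  | cons v vs ih =>
    intro S L hnd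
    by_cases hn : PySem.Int.bxor x v ∈ S
    · have hc : PySem.Set.contains S (PySem.Int.bxor x v) = true := by
        rw [PySem.Set.contains_iff]; exact hn
      have hB : pyBStep x (S, L) v = (S, L) := by
        simp [pyBStep, hc]
        exact hn
      rw [List.foldl_cons, hB]
      obtain ⟨Δ, h1, h2, h3, h4⟩ := ih S L hnd
      refine ⟨Δ, h1, h2, fun z hz => ?_, fun u hu => ?_⟩
      · obtain ⟨w, hw, hq⟩ := h3 z hz; exact ⟨w, List.mem_cons_of_mem _ hw, hq⟩
      · rcases List.mem_cons.mp hu with rfl | hu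
        · exact List.mem_append.mpr (Or.inl hn)
        · exact h4 u hu
    · have hc : PySem.Set.contains S (PySem.Int.bxor x v) = false := by
        rw [Bool.eq_false_iff, Ne, PySem.Set.contains_iff]; exact hn
      have hB : pyBStep x (S, L) v
          = (S ++ [PySem.Int.bxor x v], L ++ [PySem.Int.bxor x v]) := by
        simp [pyBStep, hc, PySem.Set.add_of_not_mem hn]
        exact hn
      rw [List.foldl_cons, hB]
      have hnd' : (S ++ [PySem.Int.bxor x v]).Nodup := by
        simp [List.nodup_append, hnd]
        exact fun a ha h => hn (h ▸ ha)
      obtain ⟨Δ, h1, h2, h3, h4⟩ := ih (S ++ [PySem.Int.bxor x v]) (L ++ [PySem.Int.bxor x v]) hnd'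
      refine ⟨PySem.Int.bxor x v :: Δ, ?_, ?_, ?_, ?_⟩
      · rw [h1]; simp
      · simpa [List.append_assoc] using h2
      · intro z hz
        rcases List.mem_cons.mp hz with rfl | hz
        · exact ⟨v, List.mem_cons_self, rfl⟩
        · obtain ⟨w, hw, hq⟩ := h3 z hz; exact ⟨w, List.mem_cons_of_mem _ hw, hq⟩
      · intro u hu
        rcases List.mem_cons.mp hu with rfl | hu
        · simp
        · have := h4 u hu; simpa [List.append_assoc] using this

theorem expand_char (values : List Int) : ∀ (fr : List Int) (S : PySem.Set Int) (L : List Int),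
    S.Nodup →
    ∃ Δ, fr.foldl (pyBExpand values) (S, L) = (S ++ Δ, L ++ Δ) ∧ (S ++ Δ).Nodup ∧
      (∀ z ∈ Δ, ∃ y ∈ fr, ∃ v ∈ values, z = PySem.Int.bxor y v) ∧
      (∀ y ∈ fr, ∀ v ∈ values, PySem.Int.bxor y v ∈ S ++ Δ) := by
  intro fr
  induction fr with
  | nil => intro S L hnd; exact ⟨[], by simp, by simpa using hnd, by simp, by simp⟩
  | cons y fr ih =>
    intro S L hnd
    rw [List.foldl_cons, pyBExpand_eq]
    obtain ⟨Δy, h1, h2, h3, h4⟩ := expand1 y values S L hnd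
    rw [h1]
    obtain ⟨Δ', g1, g2, g3, g4⟩ := ih (S ++ Δy) (L ++ Δy) h2
    refine ⟨Δy ++ Δ', by rw [g1]; simp [List.append_assoc], by simpa [List.append_assoc] using g2,
      ?_, ?_⟩
    · intro z hz
      rcases List.mem_append.mp hz with hz | hz
      · obtain ⟨v, hv, hq⟩ := h3 z hz
        exact ⟨y, List.mem_cons_self, v, hv, hq⟩
      · obtain ⟨y', hy', v, hv, hq⟩ := g3 z hz
        exact ⟨y', List.mem_cons_of_mem _ hy', v, hv, hq⟩
    · intro y' hy' v hv
      rcases List.mem_cons.mp hy' with rfl | hy'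
      · have := h4 v hv
        rw [← List.append_assoc]
        exact List.mem_append.mpr (Or.inl this)
      · have := g4 y' hy' v hv
        simpa [List.append_assoc] using this

-- no-new-layer fixpoint: once a level adds nothing, nothing is ever reachable beyond it
theorem Wle_fix (values : List Int) (d : Nat)
    (h : ∀ x, Wle values (d + 1) x → Wle values d x) :
    ∀ k x, Wle values k x → Wle values d x := by
  have aux : ∀ j x, Wle values (d + j) x → Wle values d x := by
    intro j
    induction j with
    | zero => exact fun x h0 => h0
    | succ j ih =>
      intro x hx
      rw [show d + (j + 1) = (d + j) + 1 from rfl, Wle_succ] at hx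
      rcases hx with hx | ⟨y, hy, v, hv, rfl⟩
      · exact ih x hx
      · exact h _ ((Wle_succ values d _).mpr (Or.inr ⟨y, ih y hy, v, hv, rfl⟩))
  intro k x hx
  exact aux k x (Wle_mono values (Nat.le_add_left k d) hx)

theorem never_of_closed (values : List Int) (target : Int) (S : List Int) (d : Nat)
    (hS : ∀ x, x ∈ S ↔ Wle values d x)
    (hcl : ∀ x, Wle values (d + 1) x → x ∈ S)
    (htS : target ∉ S) : minS values target = none := by
  apply minS_none_of_never
  intro k hk
  exact htS ((hS target).mpr
    (Wle_fix values d (fun x hx => (hS x).mp (hcl x hx)) k target hk))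

theorem loopB_minS (values : List Int) (target : Int) : ∀ (fB : Nat)
    (S : PySem.Set Int) (frontier : List Int) (d : Nat),
    S.Nodup → (∀ y ∈ S, y ∈ xorReach values) →
    (∀ x, x ∈ S ↔ Wle values d x) →
    (∀ y ∈ frontier, y ∈ S) →
    (∀ x, Wle values (d + 1) x → x ∈ S ∨ ∃ y ∈ frontier, ∃ v ∈ values, x = PySem.Int.bxor y v) →
    target ∉ S →
    (xorReach values).card + 2 ≤ fB + S.length →
    loopB values target fB S frontier (d : Int) = (minS values target).map (fun n => (n : Int)) := by
  intro fB
  induction fB with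
  | zero =>
    intro S frontier d hnd hSR hS hfS hcl htS hfuel
    have := nodup_subset_card hnd hSR
    omega
  | succ fB ih =>
    intro S frontier d hnd hSR hS hfS hcl htS hfuel
    rw [loopB]
    rcases frontier with _ | ⟨y, ys⟩
    · rw [if_pos (by simp)]
      rw [never_of_closed values target S d hS (fun x hx => by
        rcases hcl x hx with h | ⟨y, hy, _⟩
        · exact h
        · exact absurd hy (List.not_mem_nil)) htS]
      rfl
    · rw [if_neg (by simp)]
      obtain ⟨Δ, h1, h2, h3, h4⟩ := expand_char values (y :: ys) S [] hnd
      simp only [List.nil_append] at h1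
      have hSR' : ∀ z ∈ S ++ Δ, z ∈ xorReach values := by
        intro z hz
        rcases List.mem_append.mp hz with hz | hz
        · exact hSR z hz
        · obtain ⟨y', hy', v, hv, rfl⟩ := h3 z hz
          exact xorReach_closed values y' (hSR y' (hfS y' hy')) v hv
      have hS' : ∀ x, x ∈ S ++ Δ ↔ Wle values (d + 1) x := by
        intro x
        constructor
        · intro hx
          rcases List.mem_append.mp hx with hx | hx
          · exact Wle_mono values (Nat.le_succ d) ((hS x).mp hx)
          · obtain ⟨y', hy', v, hv, rfl⟩ := h3 x hx
            exact (Wle_succ values d _).mpr (Or.inr ⟨y', (hS y').mp (hfS y' hy'), v, hv, rfl⟩)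
        · intro hx
          rcases hcl x hx with h | ⟨y', hy', v, hv, rfl⟩
          · exact List.mem_append.mpr (Or.inl h)
          · exact h4 y' hy' v hv
      have hcl' : ∀ x, Wle values (d + 1 + 1) x →
          x ∈ S ++ Δ ∨ ∃ y' ∈ Δ, ∃ v ∈ values, x = PySem.Int.bxor y' v := by
        intro x hx
        rcases (Wle_succ values (d + 1) x).mp hx with h | ⟨y', hy', v, hv, rfl⟩
        · exact Or.inl ((hS' x).mpr h)
        · have hy'' : y' ∈ S ++ Δ := (hS' y').mpr hy'
          rcases List.mem_append.mp hy'' with hyS | hyΔ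
          · exact Or.inl ((hS' _).mpr
              ((Wle_succ values d _).mpr (Or.inr ⟨y', (hS y').mp hyS, v, hv, rfl⟩)))
          · exact Or.inr ⟨y', hyΔ, v, hv, rfl⟩
      show (if ((y :: ys).foldl (pyBExpand values) (S, [])).2.contains target = true
          then some ((d : Int) + 1)
          else loopB values target fB ((y :: ys).foldl (pyBExpand values) (S, [])).1
            ((y :: ys).foldl (pyBExpand values) (S, [])).2 ((d : Int) + 1)) = _
      rw [h1]
      by_cases hct : target ∈ Δ
      · rw [if_pos (by simpa using hct)]
        have hW1 : Wle values (d + 1) target := (hS' target).mp (List.mem_append.mpr (Or.inr hct))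
        have hW0 : ¬ Wle values d target := fun h => htS ((hS target).mpr h)
        rw [minS_some_of_level values target d hW1 hW0]
        simp
      · rw [if_neg (by simpa using hct)]
        have htS' : target ∉ S ++ Δ := by
          intro h
          rcases List.mem_append.mp h with h | h
          · exact htS h
          · exact hct h
        rcases Δ with _ | ⟨z, zs⟩
        · obtain ⟨fB', rfl⟩ : ∃ k, fB = k + 1 :=
            ⟨fB - 1, by have := nodup_subset_card hnd hSR; omega⟩
          rw [loopB]
          rw [if_pos (by simp)]
          rw [never_of_closed values target S (d + 1) (by simpa using hS')
            (fun x hx => by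
              rcases hcl' x hx with h | ⟨y', hy', _⟩
              · simpa using h
              · exact absurd hy' (List.not_mem_nil)) htS]
          rfl
        · have hc1 : ((d : Int) + 1) = (((d + 1 : Nat)) : Int) := by push_cast; ring
          rw [hc1]
          apply ih (S ++ z :: zs) (z :: zs) (d + 1) h2 hSR' hS'
            (fun w hw => List.mem_append.mpr (Or.inr hw)) hcl' htS'
          have hΔcard : (S ++ z :: zs).length ≤ (xorReach values).card :=
            nodup_subset_card h2 hSR'
          simp at hfuel hΔcard ⊢
          omega

-- ========== the DP computes minS ==========

def omin : Option Nat → Option Nat → Option Nat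
  | none, b => b
  | some m, none => some m
  | some m, some n => some (min m n)

theorem sublist_concat_iff (s p : List Int) (v : Int) :
    s.Sublist (p ++ [v]) ↔ s.Sublist p ∨ ∃ t, t.Sublist p ∧ s = t ++ [v] := by
  constructor
  · intro h
    rw [List.sublist_append_iff] at h
    obtain ⟨l1, l2, rfl, h1, h2⟩ := h
    rcases List.sublist_singleton.mp h2 with rfl | rfl
    · exact Or.inl (by simpa using h1)
    · exact Or.inr ⟨l1, h1, rfl⟩
  · rintro (h | ⟨t, ht, rfl⟩)
    · exact h.trans (List.sublist_append_left p [v])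
    · exact ht.append (List.Sublist.refl [v])

theorem xorL_concat (t : List Int) (v : Int) : xorL (t ++ [v]) = PySem.Int.bxor (xorL t) v := by
  rw [xorL_append, xorL_cons, xorL_nil, PySem.Int.bxor_zero]

theorem xorL_concat_iff (t : List Int) (v x : Int) :
    xorL (t ++ [v]) = x ↔ xorL t = PySem.Int.bxor x v := by
  rw [xorL_concat]
  constructor
  · intro h; rw [← h, bxor_cancel_right]
  · intro h; rw [h, bxor_cancel_right]

theorem minS_concat (p : List Int) (v : Int) (x : Int) :
    minS (p ++ [v]) x = omin (minS p x) ((minS p (PySem.Int.bxor x v)).map (· + 1)) := by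
  cases h1 : minS p x with
  | none =>
    cases h2 : minS p (PySem.Int.bxor x v) with
    | none =>
      show minS (p ++ [v]) x = none
      rw [minS_none_iff]
      intro s hs hx
      rcases (sublist_concat_iff s p v).mp hs with hsub | ⟨t, ht, rfl⟩
      · exact (minS_none_iff p x).mp h1 s hsub hx
      · exact (minS_none_iff p _).mp h2 t ht ((xorL_concat_iff t v x).mp hx)
    | some k =>
      show minS (p ++ [v]) x = some (k + 1)
      obtain ⟨⟨t, ht, hlen, hxt⟩, hbound⟩ := (minS_some_iff p _ k).mp h2
      rw [minS_some_iff]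
      refine ⟨⟨t ++ [v], (sublist_concat_iff _ p v).mpr (Or.inr ⟨t, ht, rfl⟩),
        by simp [hlen], (xorL_concat_iff t v x).mpr hxt⟩, ?_⟩
      intro s hs hx
      rcases (sublist_concat_iff s p v).mp hs with hsub | ⟨t', ht', rfl⟩
      · exact absurd hx ((minS_none_iff p x).mp h1 s hsub)
      · have := hbound t' ht' ((xorL_concat_iff t' v x).mp hx)
        simp only [List.length_append, List.length_cons, List.length_nil]
        omega
  | some m =>
    obtain ⟨⟨s1, hs1, hl1, hx1⟩, hb1⟩ := (minS_some_iff p x m).mp h1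
    cases h2 : minS p (PySem.Int.bxor x v) with
    | none =>
      show minS (p ++ [v]) x = some m
      rw [minS_some_iff]
      refine ⟨⟨s1, hs1.trans (List.sublist_append_left p [v]), hl1, hx1⟩, ?_⟩
      intro s hs hx
      rcases (sublist_concat_iff s p v).mp hs with hsub | ⟨t, ht, rfl⟩
      · exact hb1 s hsub hx
      · exact absurd ((xorL_concat_iff t v x).mp hx) ((minS_none_iff p _).mp h2 t ht)
    | some k =>
      show minS (p ++ [v]) x = some (min m (k + 1))
      obtain ⟨⟨s2, hs2, hl2, hx2⟩, hb2⟩ := (minS_some_iff p _ k).mp h2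
      rw [minS_some_iff]
      constructor
      · by_cases hmk : m ≤ k + 1
        · exact ⟨s1, hs1.trans (List.sublist_append_left p [v]),
            by rw [Nat.min_eq_left hmk]; exact hl1, hx1⟩
        · refine ⟨s2 ++ [v], (sublist_concat_iff _ p v).mpr (Or.inr ⟨s2, hs2, rfl⟩), ?_,
            (xorL_concat_iff s2 v x).mpr hx2⟩
          rw [Nat.min_eq_right (by omega)]
          simp [hl2]
      · intro s hs hx
        rcases (sublist_concat_iff s p v).mp hs with hsub | ⟨t, ht, rfl⟩
        · have := hb1 s hsub hx
          have h3 : min m (k + 1) ≤ m := Nat.min_le_left _ _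
          omega
        · have := hb2 t ht ((xorL_concat_iff t v x).mp hx)
          have h3 : min m (k + 1) ≤ k + 1 := Nat.min_le_right _ _
          simp only [List.length_append, List.length_cons, List.length_nil]
          omega

theorem get?_eq_find? : ∀ (l : List (Int × Int)) (k : Int),
    (PySem.Dict.mk l).get? k = (l.find? (fun p => p.1 == k)).map (fun p => p.2) := by
  intro l
  induction l with
  | nil => intro k; rfl
  | cons p l ih =>
    intro k
    obtain ⟨a, b⟩ := p
    rw [PySem.Dict.get?_mk_cons]
    by_cases h : a = k
    · rw [List.find?_cons_of_pos (by simpa using h), if_pos (by simpa using h)]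
      rfl
    · rw [List.find?_cons_of_neg (by simpa using h), if_neg (by simpa using h)]
      exact ih k

theorem dict_mk_items (d : PySem.Dict Int Int) : PySem.Dict.mk d.items = d := rfl

theorem get?_items_find? (d : PySem.Dict Int Int) (k : Int) :
    d.get? k = (d.items.find? (fun p => p.1 == k)).map (fun p => p.2) := by
  rw [← dict_mk_items d, get?_eq_find?]

theorem relax_fold (v : Int) : ∀ (R : List (Int × Int)) (b : PySem.Dict Int Int) (x : Int),
    ((R.map (fun p => PySem.Int.bxor p.1 v)).Nodup) →
    (R.foldl (pyBRelax v) b).get? x =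
      match R.find? (fun p => PySem.Int.bxor p.1 v == x) with
      | none => b.get? x
      | some p => match b.get? x with
          | none => some (p.2 + 1)
          | some b0 => if p.2 + 1 < b0 then some (p.2 + 1) else some b0 := by
  intro R
  induction R with
  | nil => intro b x _; rfl
  | cons p R ih =>
    intro b x hnd
    rw [List.map_cons, List.nodup_cons] at hnd
    obtain ⟨hfresh, hnd'⟩ := hnd
    rw [List.foldl_cons, ih (pyBRelax v b p) x hnd']
    by_cases hx : PySem.Int.bxor p.1 v = x
    · have hfind : List.find? (fun q => PySem.Int.bxor q.1 v == x) (p :: R) = some p :=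
        List.find?_cons_of_pos (by simpa using hx)
      have hfindR : List.find? (fun q => PySem.Int.bxor q.1 v == x) R = none := by
        rw [List.find?_eq_none]
        intro q hq hqx
        apply hfresh
        rw [hx, ← show PySem.Int.bxor q.1 v = x from by simpa using hqx]
        exact List.mem_map_of_mem hq
      rw [hfind, hfindR]
      simp only [pyBRelax, hx]
      cases hbx : b.get? x with
      | none => simp [hbx, PySem.Dict.get?_insert_self]
      | some b0 =>
        by_cases hlt : p.2 + 1 < b0
        · simp [hbx, hlt, PySem.Dict.get?_insert_self]
        · simp [hbx, hlt]
    · have hfind : List.find? (fun q => PySem.Int.bxor q.1 v == x) (p :: R)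
          = List.find? (fun q => PySem.Int.bxor q.1 v == x) R :=
        List.find?_cons_of_neg (by simpa using hx)
      rw [hfind]
      have hgx : (pyBRelax v b p).get? x = b.get? x := by
        simp only [pyBRelax]
        cases hb : b.get? (PySem.Int.bxor p.1 v) with
        | none => exact PySem.Dict.get?_insert_of_ne b (p.2 + 1) (fun (h : x = PySem.Int.bxor p.1 v) => hx h.symm)
        | some s =>
          by_cases hlt : p.2 + 1 < s
          · simp only [hlt, if_pos]
            exact PySem.Dict.get?_insert_of_ne b (p.2 + 1) (fun (h : x = PySem.Int.bxor p.1 v) => hx h.symm)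
          · simp [hlt]
      rw [hgx]

theorem nodup_keys_relax_fold (v : Int) : ∀ (R : List (Int × Int)) (b : PySem.Dict Int Int),
    b.keys.Nodup → (R.foldl (pyBRelax v) b).keys.Nodup := by
  intro R
  induction R with
  | nil => exact fun b h => h
  | cons p R ih =>
    intro b h
    rw [List.foldl_cons]
    apply ih
    simp only [pyBRelax]
    cases b.get? (PySem.Int.bxor p.1 v) with
    | none => exact PySem.Dict.nodup_keys_insert _ _ _ h
    | some s =>
      by_cases hlt : p.2 + 1 < s
      · simp only [hlt, if_pos]
        exact PySem.Dict.nodup_keys_insert _ _ _ h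
      · simpa [hlt] using h

def Good (p : List Int) (best : PySem.Dict Int Int) : Prop :=
  best.keys.Nodup ∧ ∀ x, best.get? x = (minS p x).map (fun n => (n : Int))

theorem Good_base : Good [] (PySem.Dict.ofList [(0, 0)]) := by
  refine ⟨by decide, ?_⟩
  intro x
  by_cases hx : x = 0
  · subst hx
    rw [minS_zero]
    rfl
  · have h1 : minS [] x = none := by
      rw [minS_none_iff]
      intro s hs hxx
      rw [List.sublist_nil.mp hs] at hxx
      exact hx (by simpa [xorL_nil] using hxx.symm)
    rw [h1]
    have h2 : (PySem.Dict.ofList [((0 : Int), (0 : Int))]) = PySem.Dict.mk [(0, 0)] := by decide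
    rw [h2, PySem.Dict.get?_mk_cons, if_neg (by simpa using fun h => hx h.symm)]
    rfl

theorem Good_step (p : List Int) (best : PySem.Dict Int Int) (v : Int) (h : Good p best) :
    Good (p ++ [v]) (best.items.foldl (pyBRelax v) best) := by
  obtain ⟨hnd, hval⟩ := h
  have hinj : Function.Injective (fun y : Int => PySem.Int.bxor y v) := by
    intro a b hab
    have h1 := congrArg (fun t => PySem.Int.bxor t v) hab
    simpa [bxor_cancel_right] using h1
  have hknd : (best.items.map (fun q => PySem.Int.bxor q.1 v)).Nodup := by
    have h0 : best.items.map (fun q => PySem.Int.bxor q.1 v)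
        = (best.items.map (fun q => q.1)).map (fun y => PySem.Int.bxor y v) := by
      rw [List.map_map]; rfl
    rw [h0]
    exact (show best.keys.Nodup from hnd).map hinj
  refine ⟨nodup_keys_relax_fold v best.items best hnd, ?_⟩
  intro x
  rw [relax_fold v best.items best x hknd]
  have hpred : (fun q : Int × Int => PySem.Int.bxor q.1 v == x)
      = (fun q : Int × Int => q.1 == PySem.Int.bxor x v) := by
    funext q
    by_cases hq : q.1 = PySem.Int.bxor x v
    · simp [hq, bxor_cancel_right]
    · have h1 : PySem.Int.bxor q.1 v ≠ x := fun hh => hq (by rw [← hh, bxor_cancel_right])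
      simp [hq, h1]
  rw [hpred]
  cases hf : best.items.find? (fun q => q.1 == PySem.Int.bxor x v) with
  | none =>
    have hget : best.get? (PySem.Int.bxor x v) = none := by
      rw [get?_items_find?, hf]; rfl
    have hmS : minS p (PySem.Int.bxor x v) = none := by
      have h3 := hval (PySem.Int.bxor x v)
      rw [hget] at h3
      cases h4 : minS p (PySem.Int.bxor x v) with
      | none => rfl
      | some k => rw [h4] at h3; simp at h3
    rw [hval x, minS_concat, hmS]
    have homin : omin (minS p x) (Option.map (· + 1) none) = minS p x := by
      cases minS p x <;> rfl
    rw [homin]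
  | some q =>
    have hq1 : q.1 = PySem.Int.bxor x v := by
      have h3 := List.find?_some hf
      simpa using h3
    have hget : best.get? (PySem.Int.bxor x v) = some q.2 := by
      rw [get?_items_find?, hf]; rfl
    obtain ⟨k, hk, hkc⟩ : ∃ k, minS p (PySem.Int.bxor x v) = some k ∧ (k : Int) = q.2 := by
      have h3 := hval (PySem.Int.bxor x v)
      rw [hget] at h3
      cases h4 : minS p (PySem.Int.bxor x v) with
      | none => rw [h4] at h3; simp at h3
      | some k => rw [h4] at h3; simp at h3; exact ⟨k, rfl, h3.symm⟩
    rw [hval x, minS_concat, hk]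
    cases hmx : minS p x with
    | none =>
      simp only [omin]
      simp
      rw [← hkc]
    | some m =>
      simp only [omin]
      simp
      rw [← hkc]
      split_ifs with hcmp
      · rw [min_eq_right (le_of_lt hcmp)]
      · rw [min_eq_left (by omega)]

theorem Good_fold : ∀ (vs p : List Int) (best : PySem.Dict Int Int), Good p best →
    Good (p ++ vs) (vs.foldl (fun best v => best.items.foldl (pyBRelax v) best) best) := by
  intro vs
  induction vs with
  | nil => intro p best h; simpa using h
  | cons v vs ih =>
    intro p best h
    rw [List.foldl_cons]
    have h2 := ih (p ++ [v]) _ (Good_step p best v h)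
    rw [List.append_assoc] at h2
    simpa using h2

theorem alt_eq_minS (values : List Int) (target : Int) :
    min_xor_path_alt values target = (minS values target).map (fun n => (n : Int)) := by
  have h := Good_fold values [] (PySem.Dict.ofList [(0, 0)]) Good_base
  simp only [List.nil_append] at h
  exact h.2 target

-- ===== VERDICT (by name: the statement is the Claim_ definition above) =====
theorem min_xor_path_spec : Claim_equal_min_xor_path := by
  unfold Claim_equal_min_xor_path
  intro values target _
  unfold Spec_min_xor_path
  rw [alt_eq_minS]
  unfold min_xor_path
  by_cases ht : target = 0
  · subst ht
    rw [loopA]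
    simp [minS_zero]
  · have hsim := sim values target (2 ^ values.length + 1) [0] (PySem.Dict.ofList [(0, 0)])
      (PySem.Set.ofList [0]) 0 (2 ^ values.length + 1)
      (by rfl)
      (by intro p hp
          have hi : (PySem.Dict.ofList [((0 : Int), (0 : Int))]).items = [(0, 0)] := by decide
          rw [hi] at hp; simp at hp; simp [hp])
      (by simp [PySem.Set.ofList])
      (by intro z hz; simp [PySem.Set.ofList] at hz; simpa [hz] using zero_mem_xorReach values)
      (by intro z hz; simpa using hz)
      (by simpa using ht)
      (by have := card_xorReach values; simp [PySem.Set.ofList]; omega)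
      (by have := card_xorReach values; simp [PySem.Set.ofList]; omega)
    have hB := loopB_minS values target (2 ^ values.length + 1) (PySem.Set.ofList [0]) [0] 0
      (by simp [PySem.Set.ofList])
      (by intro z hz; simp [PySem.Set.ofList] at hz; simpa [hz] using zero_mem_xorReach values)
      (by intro x
          rw [Wle_zero]
          simp [PySem.Set.ofList])
      (by intro z hz; simpa using hz)
      (by intro x hx
          rw [Wle_succ] at hx
          rcases hx with hx | ⟨y, hy, v, hv, rfl⟩
          · left; rw [Wle_zero values x] at hx; simp [PySem.Set.ofList, hx]
          · right
            rw [Wle_zero values y] at hy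
            exact ⟨y, by simp [hy], v, hv, rfl⟩)
      (by simpa [PySem.Set.ofList] using ht)
      (by have := card_xorReach values; simp [PySem.Set.ofList]; omega)
    have h0 : loopA values target (2 ^ values.length + 1) [(0, 0)] (PySem.Dict.ofList [(0, 0)]) =
        loopB values target (2 ^ values.length + 1) (PySem.Set.ofList [0]) [0] ((0 : Nat) : Int) := by
      simpa using hsim
    rw [h0, hB]
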